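-- pv_equiv track=rewrite | github.com/Nikhilraj155/project_managment | app/routes/csv_uploads.py | _normalize_excel_headers
-- ===== SOURCE A (Python) =====
-- from typing import Dict, Any, List
--
-- def _normalize_excel_headers(headers: List[str]) -> Dict[str, str]:
--     """Normalize Excel headers to match expected format"""
--     header_mapping = {}
--
--     for i, header in enumerate(headers):
--         if not header:
--             continue
--
--         header_lower = header.lower().strip()
--
--         # Map various header formats to standardized keys
--         if any(x in header_lower for x in ['group no', 'group']):
--             header_mapping[str(i)] = 'group_no'
--         elif any(x in header_lower for x in ['name of student', 'student name', 'student']):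
--             header_mapping[str(i)] = 'student_name'
--         elif any(x in header_lower for x in ['enrollment no', 'enrollment', 'roll', 'enrollment no']):
--             header_mapping[str(i)] = 'enrollment_no'
--         elif any(x in header_lower for x in ['guide name', 'guide', 'faculty', 'mentor']):
--             header_mapping[str(i)] = 'guide_name'
--         elif any(x in header_lower for x in ['proposed title - 01', 'title - 01', 'title1', 'proposed title-1']):
--             header_mapping[str(i)] = 'title_1'
--         elif any(x in header_lower for x in ['proposed title - 02', 'title - 02', 'title2', 'proposed title-2']):
--             header_mapping[str(i)] = 'title_2'
--         elif any(x in header_lower for x in ['proposed title - 03', 'title - 03', 'title3', 'proposed title-3']):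
--             header_mapping[str(i)] = 'title_3'
--         elif any(x in header_lower for x in ['name of team leader', 'team leader']):
--             header_mapping[str(i)] = 'team_leader'
--         elif any(x in header_lower for x in ['enrollment no. of team leader', 'team leader enrollment']):
--             header_mapping[str(i)] = 'leader_enrollment'
--         elif any(x in header_lower for x in ['section', 'class section']):
--             header_mapping[str(i)] = 'section'
--         elif any(x in header_lower for x in ['name of team member-1', 'team member-1']):
--             header_mapping[str(i)] = 'member_1'
--         elif any(x in header_lower for x in ['enrollment no. of team member-1', 'member-1 enrollment']):
--             header_mapping[str(i)] = 'member_1_enrollment'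
--         elif any(x in header_lower for x in ['name of team member-2', 'team member-2']):
--             header_mapping[str(i)] = 'member_2'
--         elif any(x in header_lower for x in ['enrollment no. of team member-2', 'member-2 enrollment']):
--             header_mapping[str(i)] = 'member_2_enrollment'
--         elif any(x in header_lower for x in ['name of team member-3', 'team member-3']):
--             header_mapping[str(i)] = 'member_3'
--         elif any(x in header_lower for x in ['enrollment no. of team member-3', 'member-3 enrollment']):
--             header_mapping[str(i)] = 'member_3_enrollment'
--         elif any(x in header_lower for x in ['proposed title-1 of project', 'title-1']):
--             header_mapping[str(i)] = 'title_1'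
--         elif any(x in header_lower for x in ['proposed title-2 of project', 'title-2']):
--             header_mapping[str(i)] = 'title_2'
--         elif any(x in header_lower for x in ['proposed title-3 of project', 'title-3']):
--             header_mapping[str(i)] = 'title_3'
--
--     return header_mapping
-- ===== SOURCE B (Python) =====
-- from typing import Dict, List
--
-- # Ordered rule table = A's if/elif branches (same order, same duplicates).
-- RULES = [
--     (['group no', 'group'], 'group_no'),
--     (['name of student', 'student name', 'student'], 'student_name'),
--     (['enrollment no', 'enrollment', 'roll', 'enrollment no'], 'enrollment_no'),
--     (['guide name', 'guide', 'faculty', 'mentor'], 'guide_name'),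
--     (['proposed title - 01', 'title - 01', 'title1', 'proposed title-1'], 'title_1'),
--     (['proposed title - 02', 'title - 02', 'title2', 'proposed title-2'], 'title_2'),
--     (['proposed title - 03', 'title - 03', 'title3', 'proposed title-3'], 'title_3'),
--     (['name of team leader', 'team leader'], 'team_leader'),
--     (['enrollment no. of team leader', 'team leader enrollment'], 'leader_enrollment'),
--     (['section', 'class section'], 'section'),
--     (['name of team member-1', 'team member-1'], 'member_1'),
--     (['enrollment no. of team member-1', 'member-1 enrollment'], 'member_1_enrollment'),
--     (['name of team member-2', 'team member-2'], 'member_2'),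
--     (['enrollment no. of team member-2', 'member-2 enrollment'], 'member_2_enrollment'),
--     (['name of team member-3', 'team member-3'], 'member_3'),
--     (['enrollment no. of team member-3', 'member-3 enrollment'], 'member_3_enrollment'),
--     (['proposed title-1 of project', 'title-1'], 'title_1'),
--     (['proposed title-2 of project', 'title-2'], 'title_2'),
--     (['proposed title-3 of project', 'title-3'], 'title_3'),
-- ]
--
--
-- def _normalize_excel_headers(headers: List[str]) -> Dict[str, str]:
--     """Normalize Excel headers to match expected format.
--
--     Rule-major, not header-major: sweep the rule table back to front, each
--     pass overwriting a parallel `keys` array wherever the rule matches, so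
--     the last write per header comes from the EARLIEST matching rule.
--     """
--     items = [(i, h.lower().strip()) for i, h in enumerate(headers) if h]
--     keys = [None] * len(items)
--     for pats, key in reversed(RULES):
--         keys = [key if any(p in hl for p in pats) else k
--                 for (_, hl), k in zip(items, keys)]
--     return {str(i): k for (i, _), k in zip(items, keys) if k is not None}
-- ===== Notes on version B (the rewrite author's own statement) =====
-- stated objective: alternative
-- what changed: Inverts the loop nesting: instead of A's header-major pass with a 19-branch first-match if/elif chain per header, B sweeps the rule table rule-major in REVERSE order, each pass overwriting a parallel keys array for every matching header (so the last write is the earliest matching rule), then builds the dict in one final zip pass.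
import Mathlib
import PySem

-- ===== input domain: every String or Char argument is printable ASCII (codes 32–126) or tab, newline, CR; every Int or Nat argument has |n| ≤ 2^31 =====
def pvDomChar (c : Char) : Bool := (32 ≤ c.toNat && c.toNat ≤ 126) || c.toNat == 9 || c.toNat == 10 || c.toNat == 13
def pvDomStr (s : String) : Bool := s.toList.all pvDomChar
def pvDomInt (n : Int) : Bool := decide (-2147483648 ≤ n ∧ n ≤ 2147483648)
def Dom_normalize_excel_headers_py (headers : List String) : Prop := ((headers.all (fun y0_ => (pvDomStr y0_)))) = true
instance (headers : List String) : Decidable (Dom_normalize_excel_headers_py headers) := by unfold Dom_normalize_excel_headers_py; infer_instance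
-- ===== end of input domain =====

-- B inverts A's loop nesting: rule-major reverse sweeps over the rule table overwrite a
-- parallel keys array (last write = earliest matching rule) instead of A's header-major
-- first-match if/elif chain; same values everywhere (objective: alternative).

-- ===== PORT A =====
def normalize_excel_headers_py (headers : List String) : List (String × String) :=
  ((PySem.List.enumerate headers 0).foldl (fun d p =>
    if p.2 = "" then d
    else
      let hl := PySem.Str.strip (PySem.Str.lower p.2)
      if (["group no", "group"].any fun x => PySem.Str.isIn x hl) then d.insert (PySem.Int.toStr p.1) "group_no"
      else if (["name of student", "student name", "student"].any fun x => PySem.Str.isIn x hl) then d.insert (PySem.Int.toStr p.1) "student_name"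
      else if (["enrollment no", "enrollment", "roll", "enrollment no"].any fun x => PySem.Str.isIn x hl) then d.insert (PySem.Int.toStr p.1) "enrollment_no"
      else if (["guide name", "guide", "faculty", "mentor"].any fun x => PySem.Str.isIn x hl) then d.insert (PySem.Int.toStr p.1) "guide_name"
      else if (["proposed title - 01", "title - 01", "title1", "proposed title-1"].any fun x => PySem.Str.isIn x hl) then d.insert (PySem.Int.toStr p.1) "title_1"
      else if (["proposed title - 02", "title - 02", "title2", "proposed title-2"].any fun x => PySem.Str.isIn x hl) then d.insert (PySem.Int.toStr p.1) "title_2"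
      else if (["proposed title - 03", "title - 03", "title3", "proposed title-3"].any fun x => PySem.Str.isIn x hl) then d.insert (PySem.Int.toStr p.1) "title_3"
      else if (["name of team leader", "team leader"].any fun x => PySem.Str.isIn x hl) then d.insert (PySem.Int.toStr p.1) "team_leader"
      else if (["enrollment no. of team leader", "team leader enrollment"].any fun x => PySem.Str.isIn x hl) then d.insert (PySem.Int.toStr p.1) "leader_enrollment"
      else if (["section", "class section"].any fun x => PySem.Str.isIn x hl) then d.insert (PySem.Int.toStr p.1) "section"
      else if (["name of team member-1", "team member-1"].any fun x => PySem.Str.isIn x hl) then d.insert (PySem.Int.toStr p.1) "member_1"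
      else if (["enrollment no. of team member-1", "member-1 enrollment"].any fun x => PySem.Str.isIn x hl) then d.insert (PySem.Int.toStr p.1) "member_1_enrollment"
      else if (["name of team member-2", "team member-2"].any fun x => PySem.Str.isIn x hl) then d.insert (PySem.Int.toStr p.1) "member_2"
      else if (["enrollment no. of team member-2", "member-2 enrollment"].any fun x => PySem.Str.isIn x hl) then d.insert (PySem.Int.toStr p.1) "member_2_enrollment"
      else if (["name of team member-3", "team member-3"].any fun x => PySem.Str.isIn x hl) then d.insert (PySem.Int.toStr p.1) "member_3"
      else if (["enrollment no. of team member-3", "member-3 enrollment"].any fun x => PySem.Str.isIn x hl) then d.insert (PySem.Int.toStr p.1) "member_3_enrollment"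
      else if (["proposed title-1 of project", "title-1"].any fun x => PySem.Str.isIn x hl) then d.insert (PySem.Int.toStr p.1) "title_1"
      else if (["proposed title-2 of project", "title-2"].any fun x => PySem.Str.isIn x hl) then d.insert (PySem.Int.toStr p.1) "title_2"
      else if (["proposed title-3 of project", "title-3"].any fun x => PySem.Str.isIn x hl) then d.insert (PySem.Int.toStr p.1) "title_3"
      else d) PySem.Dict.empty).items

-- ===== PORT B =====
def pvRules : List (List String × String) := [
  (["group no", "group"], "group_no"),
  (["name of student", "student name", "student"], "student_name"),
  (["enrollment no", "enrollment", "roll", "enrollment no"], "enrollment_no"),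
  (["guide name", "guide", "faculty", "mentor"], "guide_name"),
  (["proposed title - 01", "title - 01", "title1", "proposed title-1"], "title_1"),
  (["proposed title - 02", "title - 02", "title2", "proposed title-2"], "title_2"),
  (["proposed title - 03", "title - 03", "title3", "proposed title-3"], "title_3"),
  (["name of team leader", "team leader"], "team_leader"),
  (["enrollment no. of team leader", "team leader enrollment"], "leader_enrollment"),
  (["section", "class section"], "section"),
  (["name of team member-1", "team member-1"], "member_1"),
  (["enrollment no. of team member-1", "member-1 enrollment"], "member_1_enrollment"),
  (["name of team member-2", "team member-2"], "member_2"),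
  (["enrollment no. of team member-2", "member-2 enrollment"], "member_2_enrollment"),
  (["name of team member-3", "team member-3"], "member_3"),
  (["enrollment no. of team member-3", "member-3 enrollment"], "member_3_enrollment"),
  (["proposed title-1 of project", "title-1"], "title_1"),
  (["proposed title-2 of project", "title-2"], "title_2"),
  (["proposed title-3 of project", "title-3"], "title_3")]

-- rule-major reverse sweep: each pass overwrites `keys` where the rule matches, so the
-- final value per header comes from the earliest matching rule
def normalize_excel_headers_py_alt (headers : List String) : List (String × String) :=
  let items := (PySem.List.enumerate headers 0).filterMap
      (fun p => if p.2 = "" then none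
                else some (p.1, PySem.Str.strip (PySem.Str.lower p.2)))
  let keys := pvRules.reverse.foldl
      (fun (ks : List (Option String)) (r : List String × String) =>
        List.zipWith (fun (q : Int × String) k =>
          if r.1.any (fun pat => PySem.Str.isIn pat q.2) then some r.2 else k) items ks)
      (items.map (fun _ => (none : Option String)))
  (PySem.Dict.ofList ((items.zip keys).filterMap
      (fun q => (q.2).map (fun k => (PySem.Int.toStr q.1.1, k))))).items

-- ===== PRECONDITION & SPEC =====
def Spec_normalize_excel_headers_py (headers : List String) (out : List (String × String)) : Prop := out = normalize_excel_headers_py_alt headers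
instance (headers : List String) (out : List (String × String)) : Decidable (Spec_normalize_excel_headers_py headers out) := by unfold Spec_normalize_excel_headers_py; infer_instance

-- ===== CLAIM (what is proved, stated in full; the proofs are below) =====
def Claim_equal_normalize_excel_headers_py : Prop := ∀ (headers : List String), Dom_normalize_excel_headers_py headers → Spec_normalize_excel_headers_py headers (normalize_excel_headers_py headers)

-- ===== LEMMAS AND PROOFS =====

-- zipping a list with its own map is a map of pairs
theorem pv_zip_map_self {α β : Type} (xs : List α) (f : α → β) :
    xs.zip (xs.map f) = xs.map (fun x => (x, f x)) := by
  induction xs with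
  | nil => rfl
  | cons x xs ih => simp [List.zip_cons_cons, ih]

-- zipWith against a map of the same list is one map
theorem pv_zipWith_map_right {α β γ : Type} (xs : List α) (g : α → β) (f : α → β → γ) :
    List.zipWith f xs (xs.map g) = xs.map (fun x => f x (g x)) := by
  induction xs with
  | nil => rfl
  | cons y ys ih => simp [ih]

-- loop interchange: a fold of pointwise (zipWith) passes over `xs`, started from a map
-- over `xs`, is a single map performing the whole fold per element
theorem pv_foldl_zipWith_interchange {ρ α β : Type} (rs : List ρ) (xs : List α)
    (f : ρ → α → β → β) (g0 : α → β) :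
    rs.foldl (fun ks r => List.zipWith (fun x k => f r x k) xs ks) (xs.map g0)
      = xs.map (fun x => rs.foldl (fun k r => f r x k) (g0 x)) := by
  induction rs generalizing g0 with
  | nil => simp
  | cons r rs ih =>
      rw [List.foldl_cons, pv_zipWith_map_right xs g0 (fun x k => f r x k), ih]
      simp

-- proof-only spelling of the per-header reverse-sweep result as a first-match recursion
def pvChainKey : List (List String × String) → String → Option String
  | [], _ => none
  | (pats, key) :: rest, hl =>
    if pats.any (fun q => PySem.Str.isIn q hl) then some key else pvChainKey rest hl

theorem pv_foldr_chainKey (rs : List (List String × String)) (hl : String) :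
    rs.foldr (fun r k => if r.1.any (fun pat => PySem.Str.isIn pat hl) then some r.2 else k) none
      = pvChainKey rs hl := by
  induction rs with
  | nil => rfl
  | cons r rest ih => cases r; simp only [List.foldr_cons, pvChainKey]; rw [ih]

-- folding over a filterMap is one fold whose step eliminates the Option
theorem pv_foldl_filterMap_elim {α β γ : Type} (f : α → Option β) (g : γ → β → γ)
    (l : List α) (init : γ) :
    (l.filterMap f).foldl g init = l.foldl (fun x y => (f y).elim x (g x)) init := by
  rw [List.foldl_filterMap]
  congr 1
  funext x y
  cases f y <;> rfl

-- ===== VERDICT (by name: the statement is the Claim_ definition above) =====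
set_option maxHeartbeats 1600000 in
theorem normalize_excel_headers_py_spec : Claim_equal_normalize_excel_headers_py := by
  intro headers _
  unfold Spec_normalize_excel_headers_py
  have alt_eq : normalize_excel_headers_py_alt headers =
      (PySem.Dict.ofList (((PySem.List.enumerate headers 0).filterMap
          (fun p => if p.2 = "" then none
                    else some (p.1, PySem.Str.strip (PySem.Str.lower p.2)))).filterMap
        (fun q => (pvRules.foldr (fun r k =>
              if r.1.any (fun pat => PySem.Str.isIn pat q.2) then some r.2 else k) none).map
          (fun k => (PySem.Int.toStr q.1, k))))).items := by
    simp only [normalize_excel_headers_py_alt]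
    generalize (PySem.List.enumerate headers 0).filterMap
        (fun p => if p.2 = "" then none
                  else some (p.1, PySem.Str.strip (PySem.Str.lower p.2))) = items
    rw [pv_foldl_zipWith_interchange pvRules.reverse items
          (fun r q k => if r.1.any (fun pat => PySem.Str.isIn pat q.2) then some r.2 else k)
          (fun _ => none),
        pv_zip_map_self, List.filterMap_map]
    simp only [List.foldl_reverse, Function.comp]
  rw [alt_eq]
  unfold normalize_excel_headers_py
  rw [List.filterMap_filterMap]
  rw [show ∀ l : List (String × String), PySem.Dict.ofList l = l.foldl (fun d q => d.insert q.1 q.2) PySem.Dict.empty from fun _ => rfl]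
  rw [pv_foldl_filterMap_elim]
  congr 2
  funext d p
  by_cases h : p.2 = ""
  · rw [if_pos h]
    simp only [if_pos h, Option.bind_none, Option.elim_none]
  · rw [if_neg h]
    simp only [if_neg h, Option.bind_some]
    rw [pv_foldr_chainKey]
    simp only [pvRules, pvChainKey]
    simp only [apply_ite (Option.map (fun k => (PySem.Int.toStr p.1, k))), Option.map_some,
      Option.map_none]
    simp only [apply_ite (fun o : Option (String × String) => o.elim d (fun b => d.insert b.1 b.2)),
      Option.elim_some, Option.elim_none]
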